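-- pv_equiv track=rewrite | github.com/MrBrantCode/unitest_baseline | mut_generate/mist_train_taco/taco_7574/solution.py | maximize_number_with_swaps
-- ===== SOURCE A (Python) =====
-- def maximize_number_with_swaps(a: str, k: int) -> str:
--     a = list(a)
--     b = sorted(a, reverse=True)
--
--     for i in range(len(a)):
--         for x in b:
--             if a[i] == x:
--                 break
--             j = a.index(x, i)
--             if j - i > k:
--                 continue
--             k -= j - i
--             a[i:j + 1] = [a[j]] + a[i:j]
--             break
--         b.remove(a[i])
--
--     return ''.join(a)
-- ===== SOURCE B (Python) =====
-- def maximize_number_with_swaps(a: str, k: int) -> str: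
--     # Greedy rewritten as consume-and-emit: repeatedly pop the earliest maximum
--     # of the first k+1 remaining characters; no sorted candidate list is kept.
--     s = list(a)
--     out = []
--     while s and k > 0:
--         w = s[:k + 1]
--         j = w.index(max(w))
--         out.append(s.pop(j))
--         k -= j
--     return ''.join(out + s)
-- ===== Notes on version B (the rewrite author's own statement) =====
-- stated objective: faster
-- what changed: Replaces A's sorted candidate list with per-candidate index scans by a consume-and-emit greedy that pops the earliest maximum of the first k+1 remaining characters.
import Mathlib
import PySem

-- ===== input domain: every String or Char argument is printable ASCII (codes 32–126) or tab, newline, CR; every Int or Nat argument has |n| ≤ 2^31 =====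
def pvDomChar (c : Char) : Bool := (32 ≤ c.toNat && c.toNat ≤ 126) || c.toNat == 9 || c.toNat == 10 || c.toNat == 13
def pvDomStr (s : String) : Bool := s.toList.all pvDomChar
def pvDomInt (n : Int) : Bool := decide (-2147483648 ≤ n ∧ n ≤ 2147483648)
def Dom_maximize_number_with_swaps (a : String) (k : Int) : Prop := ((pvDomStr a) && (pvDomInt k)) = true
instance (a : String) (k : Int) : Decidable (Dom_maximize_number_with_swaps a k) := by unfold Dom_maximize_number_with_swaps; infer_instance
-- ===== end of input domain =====

-- B replaces A's sorted candidate list and repeated index scans by a consume-and-emit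
-- greedy (pop the earliest maximum of the first k+1 remaining chars); measured faster.
-- Equivalence is about the return value; Python A mutates only local lists.

-- ===== PORT A =====
-- inner 'for x in b' loop: state (a, k); returns on break / fall-through alike
def pvInnerA (aL : List Char) (i : Int) (k : Int) : List Char → (List Char × Int)
  | [] => (aL, k)
  | x :: bs =>
    if PySem.List.pyGetD aL i ' ' = x then (aL, k)          -- if a[i] == x: break
    else
      -- j = a.index(x, i)  (exact: Python's a.index(x, i) = i + a[i:].index(x))
      match PySem.List.index? (PySem.List.slice aL (some i) none) x with
      | none => (aL, k)                                      -- unreachable: x ∈ b ⊆ multiset of a[i:] (Python would raise ValueError)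
      | some j0 =>
        let j : Int := i + (j0 : Int)
        if j - i > k then pvInnerA aL i k bs                 -- continue
        else
          -- a[i:j+1] = [a[j]] + a[i:j]
          let aL' := PySem.List.slice aL none (some i)
                      ++ (PySem.List.pyGetD aL j ' ' :: PySem.List.slice aL (some i) (some j))
                      ++ PySem.List.slice aL (some (j + 1)) none
          (aL', k - (j - i))

def maximize_number_with_swaps (a : String) (k : Int) : String :=
  let aL := a.toList
  let b := PySem.List.sorted aL (fun c => c) true
  let st := (PySem.List.pyRange 0 (aL.length : Int) 1).foldl
    (fun (st : List Char × List Char × Int) i =>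
      let r := pvInnerA st.1 i st.2.2 st.2.1
      let b' := (PySem.List.remove? st.2.1 (PySem.List.pyGetD r.1 i ' ')).getD st.2.1  -- b.remove(a[i]); absence unreachable
      (r.1, b', r.2))
    (aL, b, k)
  String.ofList st.1

-- ===== PORT B =====
-- s.pop(j) leaves a shorter list (the none default is Python's unreachable IndexError)
theorem pvPop_len (s : List Char) (i : Int) (d : Char) (hs : s ≠ []) :
    (((PySem.List.pop? s i).getD (d, [])).2).length < s.length := by
  cases hp : PySem.List.pop? s i with
  | none => simpa using List.length_pos_of_ne_nil hs
  | some r =>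
    have h2 : r.2.length + 1 = s.length := PySem.List.length_of_pop?_eq_some _ hp
    simp; omega

-- while s and k > 0: w = s[:k+1]; j = w.index(max(w)); out.append(s.pop(j)); k -= j
def pvGoB (s : List Char) (k : Int) : List Char :=
  match hs : s with
  | [] => s
  | c :: _ =>
    if k ≤ 0 then s
    else
      let w := PySem.List.slice s none (some (k + 1))
      let m := (PySem.List.max? w (fun x => x)).getD c      -- max(w); w ≠ [] here
      let j := (PySem.List.index? w m).getD 0               -- w.index(m); m ∈ w
      let r := (PySem.List.pop? s (j : Int)).getD (c, [])   -- s.pop(j); j < len s always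
      r.1 :: pvGoB r.2 (k - (j : Int))
  termination_by s.length
  decreasing_by
    have h2 := pvPop_len s ((PySem.List.index? (PySem.List.slice s none (some (k + 1)))
        ((PySem.List.max? (PySem.List.slice s none (some (k + 1))) (fun x => x)).getD c)).getD 0 : Nat)
        c (by rw [hs]; simp)
    rw [← hs]
    exact h2

def maximize_number_with_swaps_alt (a : String) (k : Int) : String :=
  String.ofList (pvGoB a.toList k)

-- ===== PRECONDITION & SPEC =====
def Spec_maximize_number_with_swaps (a : String) (k : Int) (out : String) : Prop := out = maximize_number_with_swaps_alt a k
instance (a : String) (k : Int) (out : String) : Decidable (Spec_maximize_number_with_swaps a k out) := by unfold Spec_maximize_number_with_swaps; infer_instance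

-- ===== CLAIM (what is proved, stated in full; the proofs are below) =====
def Claim_equal_maximize_number_with_swaps : Prop := ∀ (a : String) (k : Int), Dom_maximize_number_with_swaps a k → Spec_maximize_number_with_swaps a k (maximize_number_with_swaps a k)


-- ===== LEMMAS AND PROOFS =====

-- a[i] for a = done ++ x :: tl, i = len done
theorem pvGetD_append_len (done tl : List Char) (x : Char) (d : Char) :
    PySem.List.pyGetD (done ++ x :: tl) (done.length : Int) d = x := by
  have h : PySem.List.pyGetD (done ++ x :: tl) (done.length : Int) d
      = (PySem.List.pyGet? (done ++ x :: tl) (done.length : Int)).getD d := by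
    simp [PySem.List.pyGetD, PySem.List.pyGet?]
  rw [h, PySem.List.pyGet?_append_length]
  rfl

-- Python's a.index(v, i) search space: a[i:] = rest
theorem pvSlice_from_len (done rest : List Char) :
    PySem.List.slice (done ++ rest) (some (done.length : Int)) none = rest := by
  rw [PySem.List.slice_from _ (by positivity)]
  simp

-- a non-head hit has positive index
theorem pvIndex_pos (r0 : Char) (rs : List Char) (x : Char) (j0 : Nat)
    (h : PySem.List.index? (r0 :: rs) x = some j0) (hne : r0 ≠ x) : 1 ≤ j0 := by
  rcases PySem.List.getElem_of_index?_eq_some h with ⟨hk, hx, _⟩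
  rcases Nat.eq_zero_or_pos j0 with h0 | h1
  · subst h0; simp at hx; exact absurd hx hne
  · exact h1

-- erasing one value commutes with the descending sort (key = identity)
theorem pvSorted_erase (l : List Char) (c : Char) (hc : c ∈ l) :
    (PySem.List.sorted l (fun x => x) true).erase c
      = PySem.List.sorted (l.erase c) (fun x => x) true := by
  apply List.Perm.eq_of_pairwise (le := fun a b : Char => b ≤ a)
  · exact fun a b _ _ h1 h2 => le_antisymm h2 h1
  · exact List.Pairwise.sublist List.erase_sublist (PySem.List.sorted_pairwise_rev l (fun x => x))
  · exact PySem.List.sorted_pairwise_rev _ _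
  · exact ((PySem.List.sorted_perm l _ true).erase c).trans
      ((PySem.List.sorted_perm (l.erase c) _ true).symm)

-- membership in the window from an affordable index
theorem pvMem_window (rest : List Char) (x : Char) (j0 : Nat) (k : Int)
    (h : PySem.List.index? rest x = some j0) (hle : (j0 : Int) ≤ k) :
    x ∈ rest.take (k + 1).toNat := by
  rcases PySem.List.getElem_of_index?_eq_some h with ⟨hk', hx, _⟩
  have hj : j0 < (k + 1).toNat := by omega
  have : (rest.take ((k + 1).toNat))[j0]'(by simp [List.length_take]; omega) = rest[j0] :=
    List.getElem_take
  rw [← hx, ← this]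
  exact List.getElem_mem _

-- reduction lemmas for one iteration of the inner loop
theorem pvInnerA_cons_break (aL : List Char) (i k : Int) (x : Char) (bs : List Char)
    (h : PySem.List.pyGetD aL i ' ' = x) :
    pvInnerA aL i k (x :: bs) = (aL, k) := by
  rw [pvInnerA, if_pos h]

theorem pvInnerA_cons_none (aL : List Char) (i k : Int) (x : Char) (bs : List Char)
    (hne : ¬ PySem.List.pyGetD aL i ' ' = x)
    (hidx : PySem.List.index? (PySem.List.slice aL (some i) none) x = none) :
    pvInnerA aL i k (x :: bs) = (aL, k) := by
  rw [pvInnerA, if_neg hne, hidx]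

theorem pvInnerA_cons_some (aL : List Char) (i k : Int) (x : Char) (bs : List Char) (j0 : Nat)
    (hne : ¬ PySem.List.pyGetD aL i ' ' = x)
    (hidx : PySem.List.index? (PySem.List.slice aL (some i) none) x = some j0) :
    pvInnerA aL i k (x :: bs) =
      if i + (j0 : Int) - i > k then pvInnerA aL i k bs
      else (PySem.List.slice aL none (some i)
              ++ (PySem.List.pyGetD aL (i + (j0 : Int)) ' '
                  :: PySem.List.slice aL (some i) (some (i + (j0 : Int))))
              ++ PySem.List.slice aL (some (i + (j0 : Int) + 1)) none,
            k - (i + (j0 : Int) - i)) := by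
  rw [pvInnerA, if_neg hne, hidx]

-- the inner loop does nothing when no swap is affordable (k ≤ 0)
theorem pvInnerA_nonpos (done : List Char) (r0 : Char) (rs : List Char) (k : Int)
    (hk : k ≤ 0) (b : List Char) :
    pvInnerA (done ++ r0 :: rs) (done.length : Int) k b = (done ++ r0 :: rs, k) := by
  induction b with
  | nil => rfl
  | cons x bs ih =>
    by_cases hx : PySem.List.pyGetD (done ++ r0 :: rs) (done.length : Int) ' ' = x
    · exact pvInnerA_cons_break _ _ _ _ _ hx
    · rw [pvGetD_append_len] at hx
      cases hidx : PySem.List.index? (PySem.List.slice (done ++ r0 :: rs) (some (done.length : Int)) none) x with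
      | none => exact pvInnerA_cons_none _ _ _ _ _ (by rw [pvGetD_append_len]; exact hx) hidx
      | some j0 =>
        rw [pvInnerA_cons_some _ _ _ _ _ j0 (by rw [pvGetD_append_len]; exact hx) hidx]
        rw [pvSlice_from_len] at hidx
        have h1 := pvIndex_pos r0 rs x j0 hidx hx
        rw [if_pos (by omega)]
        exact ih

-- the inner loop does nothing when a[i] is already maximal in the window
theorem pvInnerA_stay (done : List Char) (r0 : Char) (rs : List Char) (k : Int)
    (hk : ¬ k ≤ 0) (hmax : ∀ y ∈ (r0 :: rs).take (k + 1).toNat, y ≤ r0)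
    (b : List Char) (hpw : b.Pairwise (fun x y => y ≤ x))
    (hsub : ∀ x ∈ b, x ∈ r0 :: rs) (hr0 : r0 ∈ b) :
    pvInnerA (done ++ r0 :: rs) (done.length : Int) k b = (done ++ r0 :: rs, k) := by
  induction b with
  | nil => exact absurd hr0 (by simp)
  | cons x bs ih =>
    by_cases hx : r0 = x
    · exact pvInnerA_cons_break _ _ _ _ _ (by rw [pvGetD_append_len]; exact hx)
    · have hr0' : r0 ∈ bs := by
        rcases List.mem_cons.mp hr0 with h | h
        · exact absurd h hx
        · exact h
      have hxge : r0 ≤ x := (List.pairwise_cons.mp hpw).1 r0 hr0'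
      cases hidx : PySem.List.index? (PySem.List.slice (done ++ r0 :: rs) (some (done.length : Int)) none) x with
      | none => exact pvInnerA_cons_none _ _ _ _ _ (by rw [pvGetD_append_len]; exact hx) hidx
      | some j0 =>
        rw [pvInnerA_cons_some _ _ _ _ _ j0 (by rw [pvGetD_append_len]; exact hx) hidx]
        rw [pvSlice_from_len] at hidx
        by_cases hjk : (j0 : Int) ≤ k
        · have hw := pvMem_window _ x j0 k hidx hjk
          have hle := hmax x hw
          exact absurd (le_antisymm hle hxge) (fun h => hx h.symm)
        · rw [if_pos (by omega)]
          exact ih (List.pairwise_cons.mp hpw).2 (fun y hy => hsub y (List.mem_cons_of_mem x hy)) hr0'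

-- the slice surgery a[i:j+1] = [a[j]] + a[i:j] at i = len done, j = i + jw
theorem pvSwap_list (done rest : List Char) (jw : Nat) (m : Char)
    (hjw : jw < rest.length) (hm : rest[jw] = m) :
    PySem.List.slice (done ++ rest) none (some (done.length : Int))
      ++ (PySem.List.pyGetD (done ++ rest) ((done.length : Int) + (jw : Int)) ' '
          :: PySem.List.slice (done ++ rest) (some (done.length : Int)) (some ((done.length : Int) + (jw : Int))))
      ++ PySem.List.slice (done ++ rest) (some ((done.length : Int) + (jw : Int) + 1)) none
    = done ++ m :: rest.eraseIdx jw := by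
  have h1 : PySem.List.slice (done ++ rest) none (some (done.length : Int)) = done := by
    rw [PySem.List.slice_to _ (by positivity)]
    simp
  have hcast : (done.length : Int) + (jw : Int) = ((done.length + jw : Nat) : Int) := by push_cast; ring
  have h2 : PySem.List.pyGetD (done ++ rest) ((done.length : Int) + (jw : Int)) ' ' = m := by
    have hd : PySem.List.pyGetD (done ++ rest) ((done.length : Int) + (jw : Int)) ' '
        = (PySem.List.pyGet? (done ++ rest) ((done.length : Int) + (jw : Int))).getD ' ' := by
      simp [PySem.List.pyGetD, PySem.List.pyGet?]
    rw [hd, show ((done.length : Int) + (jw : Int)) = ((done.length : Int) + jw) from rfl,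
        PySem.List.pyGet?_append_right]
    simp [List.getElem?_eq_getElem hjw, hm]
  have h3 : PySem.List.slice (done ++ rest) (some (done.length : Int)) (some ((done.length : Int) + (jw : Int)))
      = rest.take jw := by
    rw [PySem.List.slice_natCast_add]
    simp
  have h4 : PySem.List.slice (done ++ rest) (some ((done.length : Int) + (jw : Int) + 1)) none
      = rest.drop (jw + 1) := by
    rw [PySem.List.slice_from _ (by positivity)]
    have : ((done.length : Int) + (jw : Int) + 1).toNat = done.length + (jw + 1) := by omega
    rw [this, ← List.drop_drop]
    simp
  rw [h1, h2, h3, h4, List.eraseIdx_eq_take_drop_succ]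
  simp

-- the inner loop performs exactly the swap B performs
theorem pvInnerA_swap (done : List Char) (r0 : Char) (rs : List Char) (k : Int) (m : Char) (jw : Nat)
    (hmax : ∀ y ∈ (r0 :: rs).take (k + 1).toNat, y ≤ m)
    (hjw : PySem.List.index? (r0 :: rs) m = some jw) (hjk : (jw : Int) ≤ k)
    (hgt : r0 < m)
    (b : List Char) (hpw : b.Pairwise (fun x y => y ≤ x))
    (hsub : ∀ x ∈ b, x ∈ r0 :: rs) (hm : m ∈ b) :
    pvInnerA (done ++ r0 :: rs) (done.length : Int) k b
      = (done ++ m :: (r0 :: rs).eraseIdx jw, k - jw) := by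
  induction b with
  | nil => exact absurd hm (by simp)
  | cons x bs ih =>
    rcases PySem.List.getElem_of_index?_eq_some hjw with ⟨hlt, hgw, _⟩
    by_cases hx : r0 = x
    · exfalso
      rcases List.mem_cons.mp hm with h | h
      · exact absurd (h.trans hx.symm) (ne_of_gt hgt)
      · have h2 := (List.pairwise_cons.mp hpw).1 m h
        rw [← hx] at h2
        exact absurd h2 (not_le.mpr hgt)
    · by_cases hxm : x = m
      · subst hxm
        rw [pvInnerA_cons_some _ _ _ _ _ jw (by rw [pvGetD_append_len]; exact hx)
              (by rw [pvSlice_from_len]; exact hjw)]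
        rw [if_neg (by omega)]
        rw [Prod.mk.injEq]
        exact ⟨pvSwap_list done (r0 :: rs) jw x hlt hgw, by ring_nf⟩
      · have hm' : m ∈ bs := by
          rcases List.mem_cons.mp hm with h | h
          · exact absurd h.symm hxm
          · exact h
        have hxge : m ≤ x := (List.pairwise_cons.mp hpw).1 m hm'
        cases hidx : PySem.List.index? (PySem.List.slice (done ++ r0 :: rs) (some (done.length : Int)) none) x with
        | none =>
          rw [pvSlice_from_len] at hidx
          exact absurd (hsub x (by simp)) ((PySem.List.index?_eq_none_iff _ _).mp hidx)
        | some j0 =>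
          rw [pvInnerA_cons_some _ _ _ _ _ j0 (by rw [pvGetD_append_len]; exact hx) hidx]
          rw [pvSlice_from_len] at hidx
          by_cases hjk : (j0 : Int) ≤ k
          · have hw := pvMem_window _ x j0 k hidx hjk
            have hle := hmax x hw
            exact absurd (le_antisymm hle hxge) hxm
          · rw [if_pos (by omega)]
            exact ih (List.pairwise_cons.mp hpw).2 (fun y hy => hsub y (List.mem_cons_of_mem x hy)) hm'

-- pvGoB unfoldings
theorem pvGoB_nonpos (s : List Char) (k : Int) (hk : k ≤ 0) : pvGoB s k = s := by
  cases s with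
  | nil => rw [pvGoB.eq_def]
  | cons c cs => rw [pvGoB.eq_def]; simp [hk]

-- one step of A's outer loop = one step of B, preserving the state invariant
theorem pvStep (done : List Char) (r0 : Char) (rs : List Char) (k : Int) :
    ∃ (c : Char) (rest' : List Char) (k' : Int),
      pvInnerA (done ++ r0 :: rs) (done.length : Int) k
          (PySem.List.sorted (r0 :: rs) (fun c => c) true)
        = (done ++ c :: rest', k')
      ∧ (PySem.List.remove? (PySem.List.sorted (r0 :: rs) (fun c => c) true)
            (PySem.List.pyGetD (done ++ c :: rest') (done.length : Int) ' ')).getD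
            (PySem.List.sorted (r0 :: rs) (fun c => c) true)
        = PySem.List.sorted rest' (fun c => c) true
      ∧ pvGoB (r0 :: rs) k = c :: pvGoB rest' k'
      ∧ rest'.length = rs.length := by
  have hmemS : ∀ x, x ∈ PySem.List.sorted (r0 :: rs) (fun c => c) true ↔ x ∈ r0 :: rs :=
    fun x => PySem.List.mem_sorted _ _ _ x
  by_cases hk : k ≤ 0
  · -- no swap is affordable: A leaves a and k alone, B emits the head
    refine ⟨r0, rs, k, pvInnerA_nonpos done r0 rs k hk _, ?_, ?_, rfl⟩
    · rw [pvGetD_append_len,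
          PySem.List.remove?_eq_some_erase _ r0 ((hmemS r0).mpr (by simp)),
          Option.getD_some, pvSorted_erase _ r0 (by simp), List.erase_cons_head]
    · rw [pvGoB_nonpos _ _ hk, pvGoB_nonpos rs k hk]
  · -- k > 0: both take the earliest maximum of the window
    have htpos : (k + 1).toNat ≠ 0 := by omega
    set w := PySem.List.slice (r0 :: rs) none (some (k + 1)) with hwdef
    have hw : w = (r0 :: rs).take (k + 1).toNat := PySem.List.slice_to _ (by omega)
    have hwne : w ≠ [] := by
      rw [hw]
      obtain ⟨t', ht'⟩ : ∃ t', (k + 1).toNat = t' + 1 := ⟨(k + 1).toNat - 1, by omega⟩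
      simp [ht']
    obtain ⟨m, hmx⟩ : ∃ m, PySem.List.max? w (fun x => x) = some m := by
      cases hmx : PySem.List.max? w (fun x => x) with
      | none => exact absurd ((PySem.List.max?_eq_none_iff _ _).mp hmx) hwne
      | some m => exact ⟨m, rfl⟩
    have hmmem : m ∈ w := PySem.List.max?_mem hmx
    have hmax : ∀ y ∈ w, y ≤ m := PySem.List.max?_isMax hmx
    obtain ⟨jw, hjw⟩ : ∃ jw, PySem.List.index? w m = some jw := by
      cases hjw : PySem.List.index? w m with
      | none => exact absurd hmmem ((PySem.List.index?_eq_none_iff _ _).mp hjw)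
      | some jw => exact ⟨jw, rfl⟩
    rcases PySem.List.getElem_of_index?_eq_some hjw with ⟨hjwlt, hjwget, _⟩
    have hjrest : PySem.List.index? (r0 :: rs) m = some jw := by
      conv_lhs => rw [← List.take_append_drop (k + 1).toNat (r0 :: rs), ← hw]
      rw [PySem.List.index?_append_of_mem _ hmmem]
      exact hjw
    have hjwlen : jw < (r0 :: rs).length := by
      rw [hw, List.length_take] at hjwlt; omega
    have hjk : (jw : Int) ≤ k := by
      have : jw < (k + 1).toNat := lt_of_lt_of_le hjwlt (by rw [hw, List.length_take]; omega)
      omega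
    have hrget : (r0 :: rs)[jw]? = some m := by
      have h1 : w[jw]? = some m := by rw [List.getElem?_eq_getElem hjwlt, hjwget]
      rw [hw] at h1
      rwa [List.getElem?_take_of_lt (by rw [hw, List.length_take] at hjwlt; omega)] at h1
    have hmaxR : ∀ y ∈ (r0 :: rs).take (k + 1).toNat, y ≤ m := by rw [← hw]; exact hmax
    -- B's step
    have hB : pvGoB (r0 :: rs) k = m :: pvGoB ((r0 :: rs).eraseIdx jw) (k - jw) := by
      rw [pvGoB.eq_def]
      simp only [hk, if_false, ← hwdef, hmx, Option.getD_some, hjw,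
        PySem.List.pop?_natCast _ jw hjwlen]
      rw [List.getElem?_eq_getElem hjwlen] at hrget
      simp only [Option.some.injEq] at hrget
      simp [hrget]
    by_cases hm0 : m = r0
    · -- a[i] is already the window maximum: no swap, jw = 0
      have hjw0 : jw = 0 := by
        have h0 : PySem.List.index? (r0 :: rs) m = some 0 := by
          rw [hm0]; exact PySem.List.index?_cons_self r0 rs
        rw [h0] at hjrest
        exact (Option.some.inj hjrest).symm
      refine ⟨r0, rs, k,
        pvInnerA_stay done r0 rs k hk (fun y hy => hm0 ▸ hmaxR y hy) _
          (PySem.List.sorted_pairwise_rev _ _) (fun x hx => (hmemS x).mp hx)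
          ((hmemS r0).mpr (by simp)), ?_, ?_, rfl⟩
      · rw [pvGetD_append_len,
            PySem.List.remove?_eq_some_erase _ r0 ((hmemS r0).mpr (by simp)),
            Option.getD_some, pvSorted_erase _ r0 (by simp), List.erase_cons_head]
      · rw [hB, hjw0, hm0]
        simp
    · -- the maximum is strictly larger: A rotates it to the front, B pops it
      have hr0w : r0 ∈ w := by
        rw [hw]
        obtain ⟨t', ht'⟩ : ∃ t', (k + 1).toNat = t' + 1 := ⟨(k + 1).toNat - 1, by omega⟩
        simp [ht']
      have hgt : r0 < m := lt_of_le_of_ne (hmax r0 hr0w) (fun h => hm0 h.symm)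
      have hmrest : m ∈ r0 :: rs := by rw [hw] at hmmem; exact List.mem_of_mem_take hmmem
      refine ⟨m, (r0 :: rs).eraseIdx jw, k - jw,
        pvInnerA_swap done r0 rs k m jw hmaxR hjrest hjk hgt _
          (PySem.List.sorted_pairwise_rev _ _) (fun x hx => (hmemS x).mp hx)
          ((hmemS m).mpr hmrest), ?_, hB, by
        rw [List.length_eraseIdx_of_lt hjwlen]; simp⟩
      rw [pvGetD_append_len,
          PySem.List.remove?_eq_some_erase _ m ((hmemS m).mpr hmrest),
          Option.getD_some, pvSorted_erase _ m hmrest]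
      have heq : (r0 :: rs).erase m = (r0 :: rs).eraseIdx jw := by
        have hidxof : (r0 :: rs).idxOf m = jw := by
          have h1 : List.idxOf? m (r0 :: rs) = some jw := by
            rw [← PySem.List.index?_eq_idxOf?]; exact hjrest
          have h2 := List.idxOf_eq_getD_idxOf? (a := m) (l := r0 :: rs)
          rw [h1] at h2
          simp [h2]
        rw [← hidxof]
        exact List.erase_eq_eraseIdx_of_idxOf rfl
      rw [heq]

-- the whole outer loop, by induction on the unprocessed suffix
theorem pvMain (n : Nat) : ∀ (rest : List Char), rest.length = n → ∀ (done : List Char) (k : Int),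
    ((PySem.List.pyRange (done.length : Int) ((done.length : Int) + rest.length) 1).foldl
      (fun (st : List Char × List Char × Int) i =>
          let r := pvInnerA st.1 i st.2.2 st.2.1
          let b' := (PySem.List.remove? st.2.1 (PySem.List.pyGetD r.1 i ' ')).getD st.2.1
          (r.1, b', r.2))
      (done ++ rest, PySem.List.sorted rest (fun c => c) true, k)).1
    = done ++ pvGoB rest k := by
  induction n with
  | zero =>
    intro rest hlen done k
    have hnil : rest = [] := List.eq_nil_of_length_eq_zero hlen
    subst hnil
    have hr : PySem.List.pyRange (done.length : Int)
        ((done.length : Int) + (([] : List Char).length : Int)) 1 = [] :=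
      PySem.List.pyRange_one_eq_nil (by simp)
    rw [hr, pvGoB.eq_def]
    simp
  | succ n ih =>
    intro rest hlen done k
    cases rest with
    | nil => simp at hlen
    | cons r0 rs =>
      rw [PySem.List.pyRange_one_cons (by omega), List.foldl_cons]
      obtain ⟨c, rest', k', hInner, hRem, hB, hlen'⟩ := pvStep done r0 rs k
      simp only [hInner, hRem]
      have e1 : (done.length : Int) + 1 = (((done ++ [c]).length : Nat) : Int) := by
        simp
      have e2 : (done.length : Int) + ((r0 :: rs).length : Int)
          = (((done ++ [c]).length : Nat) : Int) + (rest'.length : Int) := by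
        simp [hlen']
        ring
      rw [e1, e2]
      have hinit : done ++ c :: rest' = (done ++ [c]) ++ rest' := by simp
      rw [hinit]
      rw [ih rest' (by simp at hlen; omega) (done ++ [c]) k']
      rw [hB]
      simp

-- ===== VERDICT (by name: the statement is the Claim_ definition above) =====
theorem maximize_number_with_swaps_spec : Claim_equal_maximize_number_with_swaps := by
  intro a k _
  unfold Spec_maximize_number_with_swaps maximize_number_with_swaps maximize_number_with_swaps_alt
  have h := pvMain a.toList.length a.toList rfl [] k
  simpa using congrArg String.ofList h
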